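-- pv_equiv track=rewrite | github.com/xaoniao/- | club-matching-platform/matching.py | calculate_time_match
-- ===== SOURCE A (Python) =====
-- def calculate_time_match(student_time, club_time):
--     """
--     计算时间匹配度
--     :param student_time: 学生可用时间 {"mon": ["evening"], ...}
--     :param club_time: 社团活动时间 {"mon": ["evening"], ...}
--     :return: 匹配度分数 0-100
--     """
--     if not student_time or not club_time:
--         return 70  # 默认较高分数
--
--     student_slots = set()
--     club_slots = set()
--
--     for day, times in student_time.items():
--         for t in times:
--             student_slots.add(f"{day}_{t}")
--
--     for day, times in club_time.items():
--         for t in times: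
--             club_slots.add(f"{day}_{t}")
--
--     if not club_slots:
--         return 70
--
--     # 计算交集比例
--     overlap = len(student_slots & club_slots)
--     return min(100, overlap * 20 + 40)  # 每个重叠时间段加20分
-- ===== SOURCE B (Python) =====
-- def calculate_time_match(student_time, club_time):
--     if not student_time or not club_time:
--         return 70
--     if not any(times for times in club_time.values()):
--         return 70
--     overlap = 0
--     for day, times in student_time.items():
--         if day in club_time:
--             overlap += len(set(times) & set(club_time[day]))
--     return min(100, overlap * 20 + 40)
-- ===== Notes on version B (the rewrite author's own statement) =====
-- stated objective: simpler
-- what changed: Drops the two flattening loops that build global f-string slot sets and their set intersection; B makes one pass over student days, intersecting each day's times with the club dict's times for that day.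
-- outside the precondition, e.g. on calculate_time_match({'a': ['b_c']}, {'a_b': ['c']}): A returns 60, B returns 40
import Mathlib
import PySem

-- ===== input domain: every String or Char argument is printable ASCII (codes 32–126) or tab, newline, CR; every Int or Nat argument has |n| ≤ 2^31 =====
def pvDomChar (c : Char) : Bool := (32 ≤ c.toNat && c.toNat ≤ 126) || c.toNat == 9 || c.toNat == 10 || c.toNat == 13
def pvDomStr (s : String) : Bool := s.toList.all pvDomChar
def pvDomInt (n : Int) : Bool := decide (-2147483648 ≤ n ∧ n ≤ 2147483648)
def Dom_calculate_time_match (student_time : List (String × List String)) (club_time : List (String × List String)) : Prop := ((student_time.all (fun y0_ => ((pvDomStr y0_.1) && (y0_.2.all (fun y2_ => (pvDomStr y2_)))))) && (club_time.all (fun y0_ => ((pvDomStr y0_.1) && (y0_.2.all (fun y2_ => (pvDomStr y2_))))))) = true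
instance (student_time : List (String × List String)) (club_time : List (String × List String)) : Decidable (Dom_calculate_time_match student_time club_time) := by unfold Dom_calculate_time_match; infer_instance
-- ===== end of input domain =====

-- B replaces A's two global f-string slot sets and their intersection by a single pass
-- over the student days with a per-day set intersection against the club dict (simpler).


-- ===== PORT A =====
-- the f-string f"{day}_{t}", as a character list (exact: Python string concatenation)
def pvSlot (d t : String) : List Char := d.toList ++ '_' :: t.toList

-- the two 'for day, times in …: for t in times: slots.add(f"{day}_{t}")' loops
def pvSlots (l : List (String × List String)) : PySem.Set (List Char) :=
  l.foldl (fun acc p => p.2.foldl (fun s t => PySem.Set.add s (pvSlot p.1 t)) acc) PySem.Set.empty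

def calculate_time_match (student_time : List (String × List String)) (club_time : List (String × List String)) : Int :=
  if student_time = [] ∨ club_time = [] then 70
  else
    let student_slots := pvSlots student_time
    let club_slots := pvSlots club_time
    if club_slots = [] then 70
    else min 100 (PySem.Set.len (PySem.Set.inter student_slots club_slots) * 20 + 40)

-- ===== PORT B =====
-- 'len(set(times) & set(club_time[day]))' for one student entry, 0 when day not in club_time
def pvDayOverlap (club_time : List (String × List String)) (p : String × List String) : Int :=
  match PySem.Dict.get? (PySem.Dict.mk club_time) p.1 with
  | some cts => PySem.Set.len (PySem.Set.inter (PySem.Set.ofList p.2) (PySem.Set.ofList cts))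
  | none => 0

def calculate_time_match_alt (student_time : List (String × List String)) (club_time : List (String × List String)) : Int :=
  if student_time = [] ∨ club_time = [] then 70
  else if !club_time.any (fun p => !p.2.isEmpty) then 70
  else
    let overlap := student_time.foldl (fun acc p => acc + pvDayOverlap club_time p) 0
    min 100 (overlap * 20 + 40)

-- ===== PRECONDITION & SPEC =====
-- Pre_ excludes (a) duplicate day keys, which a Python dict cannot carry (the association
-- list would not represent a dict), and (b) inputs where two DIFFERENT (day, time) pairs
-- produce the same f-string key f"{day}_{t}" (e.g. ({'a': ['b_c']}, {'a_b': ['c']})), on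
-- which A's flat string encoding accidentally conflates distinct slots.
def Pre_calculate_time_match (student_time : List (String × List String)) (club_time : List (String × List String)) : Prop :=
  (student_time.map Prod.fst).Nodup ∧ (club_time.map Prod.fst).Nodup ∧
  (∀ p ∈ student_time ++ club_time, ∀ q ∈ student_time ++ club_time,
    ∀ t ∈ p.2, ∀ u ∈ q.2,
      p.1.toList ++ '_' :: t.toList = q.1.toList ++ '_' :: u.toList → p.1 = q.1 ∧ t = u)
instance (student_time : List (String × List String)) (club_time : List (String × List String)) : Decidable (Pre_calculate_time_match student_time club_time) := by unfold Pre_calculate_time_match; infer_instance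

def pvWitness_calculate_time_match : (List (String × List String)) × (List (String × List String)) :=
  ([("mon", ["evening"])], [("mon", ["evening", "morning"]), ("tue", [])])

def Spec_calculate_time_match (student_time : List (String × List String)) (club_time : List (String × List String)) (out : Int) : Prop := out = calculate_time_match_alt student_time club_time
instance (student_time : List (String × List String)) (club_time : List (String × List String)) (out : Int) : Decidable (Spec_calculate_time_match student_time club_time out) := by unfold Spec_calculate_time_match; infer_instance

-- ===== CLAIM (what is proved, stated in full; the proofs are below) =====
def Claim_equal_calculate_time_match : Prop := ∀ (student_time : List (String × List String)) (club_time : List (String × List String)), Dom_calculate_time_match student_time club_time → Pre_calculate_time_match student_time club_time → Spec_calculate_time_match student_time club_time (calculate_time_match student_time club_time)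

-- ===== LEMMAS AND PROOFS =====

-- the inner 'for t in times' loop, over an arbitrary accumulator
theorem pvFoldDay_eq_update (d : String) (ts : List String) (s : PySem.Set (List Char)) :
    ts.foldl (fun s t => PySem.Set.add s (pvSlot d t)) s
      = PySem.Set.update s (ts.map (pvSlot d)) := by
  simp [PySem.Set.update, List.foldl_map]

theorem pvMem_pvSlots_from (l : List (String × List String)) :
    ∀ (s : PySem.Set (List Char)) (x : List Char),
    (x ∈ l.foldl (fun acc p => p.2.foldl (fun s t => PySem.Set.add s (pvSlot p.1 t)) acc) s)
      ↔ x ∈ s ∨ ∃ p ∈ l, ∃ t ∈ p.2, x = pvSlot p.1 t := by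
  induction l with
  | nil => simp
  | cons p rest ih =>
    intro s x
    rw [List.foldl_cons, ih, pvFoldDay_eq_update, PySem.Set.mem_update]
    simp only [List.mem_map, List.mem_cons]
    constructor
    · rintro (⟨hs | ⟨t, ht, rfl⟩⟩ | ⟨q, hq, t, ht, rfl⟩)
      · exact Or.inl hs
      · exact Or.inr ⟨p, Or.inl rfl, t, ht, rfl⟩
      · exact Or.inr ⟨q, Or.inr hq, t, ht, rfl⟩
    · rintro (hs | ⟨q, (rfl | hq), t, ht, rfl⟩)
      · exact Or.inl (Or.inl hs)
      · exact Or.inl (Or.inr ⟨t, ht, rfl⟩)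
      · exact Or.inr ⟨q, hq, t, ht, rfl⟩

theorem pvMem_pvSlots (l : List (String × List String)) (x : List Char) :
    x ∈ pvSlots l ↔ ∃ p ∈ l, ∃ t ∈ p.2, x = pvSlot p.1 t := by
  simpa [PySem.Set.empty] using pvMem_pvSlots_from l PySem.Set.empty x

-- set(...) commutes with a map that is injective on the list
theorem pvOfList_map_inj {α β : Type} [BEq α] [LawfulBEq α] [BEq β] [LawfulBEq β]
    (g : α → β) : ∀ (ts : List α), (∀ a ∈ ts, ∀ b ∈ ts, g a = g b → a = b) →
    PySem.Set.ofList (ts.map g) = (PySem.Set.ofList ts).map g := by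
  intro ts
  induction ts with
  | nil => intro _; simp [PySem.Set.ofList_nil]
  | cons t ts ih =>
    intro hg
    have hg' : ∀ a ∈ ts, ∀ b ∈ ts, g a = g b → a = b := by
      intro a ha b hb
      exact hg a (List.mem_cons_of_mem _ ha) b (List.mem_cons_of_mem _ hb)
    simp only [List.map_cons, PySem.Set.ofList_cons, ih hg', PySem.Set.discard, List.filter_map]
    have hf : List.filter ((fun y => !y == g t) ∘ g) (PySem.Set.ofList ts)
        = List.filter (fun y => !y == t) (PySem.Set.ofList ts) := by
      apply List.filter_congr
      intro a ha
      have ha' : a ∈ ts := (PySem.Set.mem_ofList ts a).mp ha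
      by_cases h : a = t
      · subst h; simp
      · have hgt : (g a == g t) = false := by
          simp only [beq_eq_false_iff_ne, ne_eq]
          exact fun e => h (hg a (List.mem_cons_of_mem _ ha') t (List.mem_cons_self ..) e)
        simp [Function.comp_apply, h, hgt]
    rw [hf]

-- uniqueness of a key under Nodup keys
theorem pvKey_unique {l : List (String × List String)} (h : (l.map Prod.fst).Nodup)
    {p q : String × List String} (hp : p ∈ l) (hq : q ∈ l) (hpq : p.1 = q.1) : p = q := by
  induction l with
  | nil => cases hp
  | cons r rest ih =>
    simp only [List.map_cons, List.nodup_cons] at h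
    rcases List.mem_cons.mp hp with rfl | hp' <;> rcases List.mem_cons.mp hq with rfl | hq'
    · rfl
    · exact absurd (hpq ▸ List.mem_map_of_mem hq') h.1
    · exact absurd (hpq ▸ List.mem_map_of_mem hp') h.1
    · exact ih h.2 hp' hq'

-- membership of a student slot in the club slot set, through the club dict lookup
theorem pvSlot_mem_clubSlots {ct : List (String × List String)}
    (hnd : (ct.map Prod.fst).Nodup) {d t : String}
    (hco : ∀ q ∈ ct, ∀ u ∈ q.2, pvSlot d t = pvSlot q.1 u → d = q.1 ∧ t = u) :
    (pvSlot d t ∈ pvSlots ct)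
      ↔ ∃ cts, PySem.Dict.get? (PySem.Dict.mk ct) d = some cts ∧ t ∈ cts := by
  rw [pvMem_pvSlots]
  constructor
  · rintro ⟨q, hq, u, hu', he⟩
    obtain ⟨hd1, rfl⟩ := hco q hq u hu' he
    refine ⟨q.2, ?_, hu'⟩
    simp only [PySem.Dict.get?]
    rcases hfind : (PySem.Dict.mk ct).items.find? (fun p => p.1 == d) with _ | r
    · refine absurd (List.find?_eq_none.mp hfind q hq) (by simp [← hd1])
    · have hr1 : r.1 = d := by simpa using List.find?_some hfind
      have : r = q := pvKey_unique hnd (List.mem_of_find?_eq_some hfind) hq (hr1.trans hd1)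
      rw [hfind, this]
      rfl
  · rintro ⟨cts, hget, ht⟩
    simp only [PySem.Dict.get?, Option.map_eq_some_iff] at hget
    obtain ⟨r, hfind, hr2⟩ := hget
    have hr1 : r.1 = d := by simpa using List.find?_some hfind
    exact ⟨r, List.mem_of_find?_eq_some hfind, t, hr2 ▸ ht, by rw [hr1]⟩

-- the per-day count equals B's per-day overlap
theorem pvDay_count {ct : List (String × List String)}
    (hnd : (ct.map Prod.fst).Nodup) (d : String) (ts : List String)
    (hsame : ∀ a ∈ ts, ∀ b ∈ ts, pvSlot d a = pvSlot d b → a = b)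
    (hcross : ∀ a ∈ ts, ∀ q ∈ ct, ∀ u ∈ q.2, pvSlot d a = pvSlot q.1 u → d = q.1 ∧ a = u) :
    ((PySem.Set.ofList (ts.map (pvSlot d))).countP (fun x => decide (x ∈ pvSlots ct)) : Int)
      = pvDayOverlap ct (d, ts) := by
  rw [pvOfList_map_inj (pvSlot d) ts hsame, List.countP_map]
  unfold pvDayOverlap
  rcases hget : PySem.Dict.get? (PySem.Dict.mk ct) d with _ | cts
  · have h0 : (PySem.Set.ofList ts).countP ((fun x => decide (x ∈ pvSlots ct)) ∘ pvSlot d) = 0 := by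
      rw [List.countP_eq_zero]
      intro t ht
      have ht' : t ∈ ts := (PySem.Set.mem_ofList ts t).mp ht
      simp only [Function.comp_apply, decide_eq_true_eq]
      intro h
      obtain ⟨c, hc, _⟩ := (pvSlot_mem_clubSlots hnd (hcross t ht')).mp h
      rw [hget] at hc; cases hc
    simp [h0]
  · simp only [PySem.Set.len, PySem.Set.inter, Int.natCast_inj]
    rw [List.countP_eq_length_filter]
    congr 1
    apply List.filter_congr
    intro t ht
    have ht' : t ∈ ts := (PySem.Set.mem_ofList ts t).mp ht
    have hmem : (pvSlot d t ∈ pvSlots ct) ↔ t ∈ cts := by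
      rw [pvSlot_mem_clubSlots hnd (hcross t ht')]
      constructor
      · rintro ⟨c, hc, h⟩; rw [hget] at hc; cases hc; exact h
      · intro h; exact ⟨cts, hget, h⟩
    simp [Function.comp_apply, hmem, PySem.Set.contains_eq_listContains,
      PySem.Set.mem_ofList]

-- main counting invariant: A's intersection count over a prefix accumulator
theorem pvMain {ct : List (String × List String)}
    (hndc : (ct.map Prod.fst).Nodup) :
    ∀ (st : List (String × List String)) (s : PySem.Set (List Char)),
    (st.map Prod.fst).Nodup →
    (∀ p ∈ st, ∀ q ∈ st, ∀ t ∈ p.2, ∀ u ∈ q.2, pvSlot p.1 t = pvSlot q.1 u → p.1 = q.1 ∧ t = u) →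
    (∀ p ∈ st, ∀ t ∈ p.2, ∀ q ∈ ct, ∀ u ∈ q.2, pvSlot p.1 t = pvSlot q.1 u → p.1 = q.1 ∧ t = u) →
    (∀ p ∈ st, ∀ t ∈ p.2, pvSlot p.1 t ∉ s) →
    ((st.foldl (fun acc p => p.2.foldl (fun s t => PySem.Set.add s (pvSlot p.1 t)) acc) s).countP
        (fun x => decide (x ∈ pvSlots ct)) : Int)
      = (s.countP (fun x => decide (x ∈ pvSlots ct)) : Int)
        + (st.map (pvDayOverlap ct)).sum := by
  intro st
  induction st with
  | nil => simp
  | cons p rest ih =>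
    intro s hnd hstst hstct hdisj
    simp only [List.map_cons, List.nodup_cons] at hnd
    have hstep : p.2.foldl (fun s t => PySem.Set.add s (pvSlot p.1 t)) s
        = s ++ PySem.Set.ofList (p.2.map (pvSlot p.1)) := by
      rw [pvFoldDay_eq_update, PySem.Set.update_eq_append_filter]
      congr 1
      rw [List.filter_eq_self]
      intro x hx
      obtain ⟨t, ht, rfl⟩ := List.mem_map.mp ((PySem.Set.mem_ofList _ _).mp hx)
      simpa using hdisj p (List.mem_cons_self ..) t ht
    have hdisj' : ∀ q ∈ rest, ∀ u ∈ q.2,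
        pvSlot q.1 u ∉ s ++ PySem.Set.ofList (p.2.map (pvSlot p.1)) := by
      intro q hq u hu hmem
      rcases List.mem_append.mp hmem with h | h
      · exact hdisj q (List.mem_cons_of_mem _ hq) u hu h
      · obtain ⟨t, ht, he⟩ := List.mem_map.mp ((PySem.Set.mem_ofList _ _).mp h)
        obtain ⟨h1, _⟩ := hstst q (List.mem_cons_of_mem _ hq) p (List.mem_cons_self ..)
          u hu t ht he.symm
        exact hnd.1 (h1 ▸ List.mem_map_of_mem hq)
    rw [List.foldl_cons, hstep,
      ih (s ++ PySem.Set.ofList (p.2.map (pvSlot p.1))) hnd.2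
        (fun a ha b hb => hstst a (List.mem_cons_of_mem _ ha) b (List.mem_cons_of_mem _ hb))
        (fun a ha => hstct a (List.mem_cons_of_mem _ ha)) hdisj',
      List.countP_append]
    have hday := pvDay_count hndc p.1 p.2
      (fun a ha b hb h => (hstst p (List.mem_cons_self ..) p (List.mem_cons_self ..) a ha b hb h).2)
      (fun a ha => hstct p (List.mem_cons_self ..) a ha)
    push_cast
    simp only [List.map_cons, List.sum_cons]
    rw [← hday]
    ring

-- the club slot set is empty exactly when every club value list is empty
theorem pvSlots_eq_nil_iff (l : List (String × List String)) :
    pvSlots l = [] ↔ ∀ p ∈ l, p.2 = [] := by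
  rw [List.eq_nil_iff_forall_not_mem]
  constructor
  · intro h p hp
    rw [List.eq_nil_iff_forall_not_mem]
    intro t ht
    exact h (pvSlot p.1 t) ((pvMem_pvSlots l _).mpr ⟨p, hp, t, ht, rfl⟩)
  · intro h x hx
    obtain ⟨p, hp, t, ht, _⟩ := (pvMem_pvSlots l x).mp hx
    rw [h p hp] at ht
    cases ht

-- ===== VERDICT (by name: the statement is the Claim_ definition above) =====
theorem calculate_time_match_spec : Claim_equal_calculate_time_match := by
  intro st ct _ hpre
  obtain ⟨hnds, hndc, hcoll⟩ := hpre
  unfold Spec_calculate_time_match calculate_time_match calculate_time_match_alt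
  by_cases hnil : st = [] ∨ ct = []
  · simp [hnil]
  · simp only [hnil, if_false]
    by_cases hempty : pvSlots ct = []
    · have : ∀ p ∈ ct, p.2 = [] := (pvSlots_eq_nil_iff ct).mp hempty
      have hb : (ct.any (fun p => !p.2.isEmpty)) = false := by
        simp only [List.any_eq_false]
        intro p hp
        simp [this p hp]
      simp [hempty, hb]
    · have hb : (ct.any (fun p => !p.2.isEmpty)) = true := by
        by_contra hb
        apply hempty
        rw [pvSlots_eq_nil_iff]
        intro p hp
        have := List.any_eq_false.mp (Bool.eq_false_iff.mpr hb) p hp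
        simpa [List.isEmpty_iff] using this
      simp only [hempty, if_false, hb, Bool.not_true, Bool.false_eq_true, if_false]
      have hcount := pvMain hndc st PySem.Set.empty hnds
        (fun p hp q hq => hcoll p (List.mem_append_left _ hp) q (List.mem_append_left _ hq))
        (fun p hp t ht q hq => hcoll p (List.mem_append_left _ hp) q (List.mem_append_right _ hq) t ht)
        (by intro p _ t _ h; cases h)
      have hsum : st.foldl (fun acc p => acc + pvDayOverlap ct p) 0
          = (st.map (pvDayOverlap ct)).sum := by
        simpa using PySem.List.foldl_add st (pvDayOverlap ct) 0
      have hlen : PySem.Set.len (PySem.Set.inter (pvSlots st) (pvSlots ct))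
          = ((pvSlots st).countP (fun x => decide (x ∈ pvSlots ct)) : Int) := by
        simp only [PySem.Set.len, PySem.Set.inter, List.countP_eq_length_filter,
          Int.natCast_inj]
        congr 1
        apply List.filter_congr
        intro x _
        simp [PySem.Set.contains_eq_listContains]
      rw [hlen, hsum]
      unfold pvSlots at hcount ⊢
      rw [hcount]
      simp [PySem.Set.empty]
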